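-- pv_equiv track=rewrite | github.com/lucasmassarico/HackerRank | no_pairs_allowed.py | minimalOperations
-- ===== SOURCE A (Python) =====
-- def minimalOperations(words):
--     counter = []
--     for word in words:
--         list_word = list(word)
--         count = 0
--         # j = 0
--         len_word = len(word) - 1
--         for j in range(len_word):
--             if list_word[j] == list_word[j + 1]:
--                 count += 1
--                 j += 1
--         counter.append(count)
--     return counter
-- ===== SOURCE B (Python) =====
-- from itertools import groupby
--
--
-- def minimalOperations(words):
--     # adjacent-equal pairs = len(word) - number of runs of equal characters
--     return [len(word) - sum(1 for _ in groupby(word)) for word in words]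
-- ===== Notes on version B (the rewrite author's own statement) =====
-- stated objective: idiomatic
-- what changed: Replaces the index-based adjacent-comparison loop with itertools.groupby run counting and the closed-form identity pairs = len(word) - number_of_runs, returned via a list comprehension.
import Mathlib
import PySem

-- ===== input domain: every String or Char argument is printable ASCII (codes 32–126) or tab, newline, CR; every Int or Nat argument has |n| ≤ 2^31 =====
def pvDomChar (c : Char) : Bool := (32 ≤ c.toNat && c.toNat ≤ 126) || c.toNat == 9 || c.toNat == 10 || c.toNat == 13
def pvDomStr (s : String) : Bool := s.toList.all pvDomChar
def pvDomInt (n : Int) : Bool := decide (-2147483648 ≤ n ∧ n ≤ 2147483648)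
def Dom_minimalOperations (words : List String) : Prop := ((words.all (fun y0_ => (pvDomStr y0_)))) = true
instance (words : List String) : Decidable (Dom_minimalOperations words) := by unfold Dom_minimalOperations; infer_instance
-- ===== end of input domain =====

-- B replaces A's index-based adjacent-comparison loop with a groupby-style run count
-- and the identity pairs = len - runs (idiomatic; same asymptotic cost).


-- ===== PORT A =====
def minimalOperations (words : List String) : List Int :=
  words.foldl (fun counter word =>
    let listWord := word.toList
    let lenWord : Int := (listWord.length : Int) - 1
    let count : Int := (PySem.List.pyRange 0 lenWord 1).foldl (fun count j =>
      if PySem.List.pyGet? listWord j = PySem.List.pyGet? listWord (j + 1) then count + 1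
      else count) 0
    counter ++ [count]) []

-- ===== PORT B =====
-- number of groups itertools.groupby(word) yields, given the first char of the current run
def runsAux : Char → List Char → Nat
  | _, [] => 1
  | c, d :: rest => if d = c then runsAux c rest else 1 + runsAux d rest

def countRuns : List Char → Nat
  | [] => 0
  | c :: rest => runsAux c rest

def minimalOperations_alt (words : List String) : List Int :=
  words.map (fun word => (word.toList.length : Int) - (countRuns word.toList : Int))

-- ===== PRECONDITION & SPEC =====
def Spec_minimalOperations (words : List String) (out : List Int) : Prop := out = minimalOperations_alt words
instance (words : List String) (out : List Int) : Decidable (Spec_minimalOperations words out) := by unfold Spec_minimalOperations; infer_instance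

-- ===== CLAIM (what is proved, stated in full; the proofs are below) =====
def Claim_equal_minimalOperations : Prop := ∀ (words : List String), Dom_minimalOperations words → Spec_minimalOperations words (minimalOperations words)

-- ===== LEMMAS AND PROOFS =====

-- number of adjacent equal pairs, structurally
def pairCountN : List Char → Nat
  | [] => 0
  | [_] => 0
  | a :: b :: t => (if a = b then 1 else 0) + pairCountN (b :: t)

theorem foldl_if_count (r : List Nat) (Q : Nat → Prop) [DecidablePred Q] (a : Int) :
    r.foldl (fun c k => if Q k then c + 1 else c) a
      = a + ((r.countP (fun k => decide (Q k)) : Nat) : Int) := by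
  induction r generalizing a with
  | nil => simp
  | cons x xs ih =>
    simp only [List.foldl_cons, List.countP_cons, ih]
    by_cases h : Q x <;> simp [h] <;> ring

theorem countP_range_pairs (l : List Char) :
    (List.range (l.length - 1)).countP
        (fun (k : Nat) => decide (PySem.List.pyGet? l (k : Int) = PySem.List.pyGet? l ((k : Int) + 1)))
      = pairCountN l := by
  induction l with
  | nil => simp [pairCountN]
  | cons a t ih =>
    cases t with
    | nil => simp [pairCountN]
    | cons b t2 =>
      have hlen : (a :: b :: t2).length - 1 = ((b :: t2).length - 1) + 1 := by simp
      rw [hlen, List.range_succ_eq_map, List.countP_cons, List.countP_map]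
      have hshift : ∀ k : Nat,
          ((fun (k : Nat) => decide (PySem.List.pyGet? (a :: b :: t2) (k : Int)
              = PySem.List.pyGet? (a :: b :: t2) ((k : Int) + 1))) ∘ Nat.succ) k
          = (fun (k : Nat) => decide (PySem.List.pyGet? (b :: t2) (k : Int)
              = PySem.List.pyGet? (b :: t2) ((k : Int) + 1))) k := by
        intro k
        have h1 : ((Nat.succ k : Nat) : Int) = ((k : Nat) : Int) + 1 := by push_cast; ring
        simp only [Function.comp_apply]
        rw [h1, PySem.List.pyGet?_cons_succ]
        have h2 : ((k : Nat) : Int) + 1 + 1 = (((k + 1 : Nat)) : Int) + 1 := by push_cast; ring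
        rw [h2, PySem.List.pyGet?_cons_succ]
        have h3 : ((k + 1 : Nat) : Int) = ((k : Nat) : Int) + 1 := by push_cast; ring
        rw [h3]
      have hmap : List.countP
          ((fun (k : Nat) => decide (PySem.List.pyGet? (a :: b :: t2) (k : Int)
              = PySem.List.pyGet? (a :: b :: t2) ((k : Int) + 1))) ∘ Nat.succ)
          (List.range ((b :: t2).length - 1)) = pairCountN (b :: t2) := by
        rw [← ih]
        apply List.countP_congr
        intro k _
        exact iff_of_eq (congrArg (· = true) (hshift k))
      have h0 : decide (PySem.List.pyGet? (a :: b :: t2) ((0 : Nat) : Int)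
            = PySem.List.pyGet? (a :: b :: t2) (((0 : Nat) : Int) + 1)) = decide (a = b) := by
        have h01 : ((0 : Nat) : Int) + 1 = ((1 : Nat) : Int) := by norm_num
        rw [PySem.List.pyGet?_natCast, h01, PySem.List.pyGet?_natCast]
        simp
      rw [hmap]
      simp only [h0, pairCountN]
      by_cases hab : a = b
      · simp [hab, Nat.add_comm]
      · simp [hab]

theorem length_eq_pairs_add_runs (l : List Char) :
    l.length = pairCountN l + countRuns l := by
  cases l with
  | nil => simp [pairCountN, countRuns]
  | cons c rest =>
    suffices h : ∀ (rest : List Char) (c : Char),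
        rest.length + 1 = pairCountN (c :: rest) + runsAux c rest by
      simpa [countRuns] using h rest c
    intro rest
    induction rest with
    | nil => intro c; simp [pairCountN, runsAux]
    | cons d t ih =>
      intro c
      have hrec := ih d
      by_cases hdc : d = c
      · subst hdc
        simp [pairCountN, runsAux] at hrec ⊢
        omega
      · have hcd : c ≠ d := fun h => hdc h.symm
        simp [pairCountN, runsAux, hdc, hcd] at hrec ⊢
        omega

theorem word_count_eq (w : String) :
    (PySem.List.pyRange 0 ((w.toList.length : Int) - 1) 1).foldl (fun count j =>
        if PySem.List.pyGet? w.toList j = PySem.List.pyGet? w.toList (j + 1) then count + 1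
        else count) (0 : Int)
      = (w.toList.length : Int) - (countRuns w.toList : Int) := by
  set l := w.toList
  rw [PySem.List.pyRange_one]
  have htn : (((l.length : Int) - 1) - 0).toNat = l.length - 1 := by omega
  rw [htn, List.foldl_map]
  have : ∀ (c : Int) (k : Nat),
      (if PySem.List.pyGet? l ((0 : Int) + k) = PySem.List.pyGet? l ((0 : Int) + k + 1)
        then c + 1 else c)
      = (if PySem.List.pyGet? l (k : Int) = PySem.List.pyGet? l ((k : Int) + 1)
        then c + 1 else c) := by
    intro c k; norm_num
  simp only [this]
  rw [foldl_if_count (List.range (l.length - 1))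
      (fun k => PySem.List.pyGet? l (k : Int) = PySem.List.pyGet? l ((k : Int) + 1)) 0]
  rw [countP_range_pairs l]
  have := length_eq_pairs_add_runs l
  omega

theorem foldl_append_singleton (words : List String) (f : String → Int) (init : List Int) :
    words.foldl (fun acc w => acc ++ [f w]) init = init ++ words.map f := by
  induction words generalizing init with
  | nil => simp
  | cons w ws ih => simp [List.foldl_cons, ih]

-- ===== VERDICT (by name: the statement is the Claim_ definition above) =====
theorem minimalOperations_spec : Claim_equal_minimalOperations := by
  intro words _
  unfold Spec_minimalOperations minimalOperations minimalOperations_alt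
  simp only []
  rw [show (fun (counter : List Int) (word : String) =>
        counter ++ [(PySem.List.pyRange 0 ((word.toList.length : Int) - 1) 1).foldl (fun count j =>
          if PySem.List.pyGet? word.toList j = PySem.List.pyGet? word.toList (j + 1) then count + 1
          else count) 0])
      = (fun counter word => counter ++ [(word.toList.length : Int) - (countRuns word.toList : Int)]) from
    funext fun counter => funext fun word => by rw [word_count_eq]]
  exact (foldl_append_singleton words _ []).trans (by simp)
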